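-- pv_equiv track=rewrite | github.com/PSgale/AdventOfCode | 2019/07/amplification_circuit2.py | check_phase_settings
-- ===== SOURCE A (Python) =====
-- def check_phase_settings(phase_settings):
--     digits = sorted(phase_settings)
--     if any(x < 5 for x in digits):
--         return False
--     for i in range(len(digits) - 1):
--         if digits[i] == digits[i + 1]:
--             return False
--     return True
-- ===== SOURCE B (Python) =====
-- def check_phase_settings(phase_settings):
--     return all(x >= 5 for x in phase_settings) and len(set(phase_settings)) == len(phase_settings)
-- ===== Notes on version B (the rewrite author's own statement) =====
-- stated objective: faster
-- what changed: B drops the sort entirely: a single all() pass checks every value is >= 5 and a set-size comparison detects duplicates, instead of sorting and scanning adjacent pairs.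
import Mathlib
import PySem

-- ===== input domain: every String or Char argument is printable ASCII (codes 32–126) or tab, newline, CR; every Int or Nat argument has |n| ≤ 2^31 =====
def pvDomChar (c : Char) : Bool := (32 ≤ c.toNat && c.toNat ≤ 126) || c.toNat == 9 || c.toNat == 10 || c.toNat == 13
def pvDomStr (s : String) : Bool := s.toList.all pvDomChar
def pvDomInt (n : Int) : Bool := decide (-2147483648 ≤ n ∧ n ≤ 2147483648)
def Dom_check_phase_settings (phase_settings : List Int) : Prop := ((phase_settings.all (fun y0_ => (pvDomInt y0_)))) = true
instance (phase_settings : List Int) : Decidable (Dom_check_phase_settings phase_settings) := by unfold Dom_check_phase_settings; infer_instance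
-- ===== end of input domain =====

-- B replaces A's sort-and-scan-adjacent-pairs by one all() pass for the >= 5 bound plus a
-- set-size comparison for distinctness (objective: simpler).

-- ===== PORT A =====
-- the index loop 'for i in range(len(digits)-1): if digits[i] == digits[i+1]: return False'
-- as the same adjacent-pair scan, early-true on an equal pair
def pvAdjDup : List Int → Bool
  | a :: b :: t => if a == b then true else pvAdjDup (b :: t)
  | _ => false

def check_phase_settings (phase_settings : List Int) : Bool :=
  let digits := PySem.List.sorted phase_settings (fun x => x) false
  if digits.any (fun x => decide (x < 5)) then false
  else if pvAdjDup digits then false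
  else true

-- ===== PORT B =====
def check_phase_settings_alt (phase_settings : List Int) : Bool :=
  phase_settings.all (fun x => decide (5 ≤ x))
    && ((PySem.Set.ofList phase_settings).length == phase_settings.length)

-- ===== PRECONDITION & SPEC =====
def Spec_check_phase_settings (phase_settings : List Int) (out : Bool) : Prop := out = check_phase_settings_alt phase_settings
instance (phase_settings : List Int) (out : Bool) : Decidable (Spec_check_phase_settings phase_settings out) := by unfold Spec_check_phase_settings; infer_instance

-- ===== CLAIM (what is proved, stated in full; the proofs are below) =====
def Claim_equal_check_phase_settings : Prop := ∀ (phase_settings : List Int), Dom_check_phase_settings phase_settings → Spec_check_phase_settings phase_settings (check_phase_settings phase_settings)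

-- ===== LEMMAS AND PROOFS =====

-- set(xs) is a sublist of xs
theorem pv_ofList_sublist (xs : List Int) : (PySem.Set.ofList xs).Sublist xs := by
  induction xs with
  | nil => simp [PySem.Set.ofList_nil]
  | cons a t ih =>
      rw [PySem.Set.ofList_cons]
      refine List.Sublist.cons₂ a ?_
      have hf : (PySem.Set.discard (PySem.Set.ofList t) a).Sublist (PySem.Set.ofList t) := by
        show ((PySem.Set.ofList t).filter _).Sublist _
        exact List.filter_sublist
      exact hf.trans ih

-- len(set(xs)) == len(xs) iff xs has no duplicates
theorem pv_len_ofList_iff (xs : List Int) :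
    ((PySem.Set.ofList xs).length = xs.length) ↔ xs.Nodup := by
  constructor
  · intro h
    have heq := (pv_ofList_sublist xs).eq_of_length h
    rw [← heq]
    exact PySem.Set.nodup_ofList (xs := xs)
  · intro h
    rw [PySem.Set.ofList_eq_self_of_nodup _ h]

-- on a ≤-sorted list, the adjacent-pair scan finds a duplicate iff the list is not Nodup
theorem pv_adjDup_iff (l : List Int) (hs : l.Pairwise (· ≤ ·)) :
    pvAdjDup l = false ↔ l.Nodup := by
  induction l with
  | nil => simp [pvAdjDup]
  | cons a t ih =>
      cases t with
      | nil => simp [pvAdjDup]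
      | cons b u =>
          rcases List.pairwise_cons.mp hs with ⟨hall, hs'⟩
          by_cases hab : a = b
          · subst hab
            simp [pvAdjDup, List.nodup_cons]
          · have hrest := ih hs'
            have hlt : a < b := lt_of_le_of_ne (hall b (by simp)) hab
            have hb_le : ∀ y ∈ u, b ≤ y := (List.pairwise_cons.mp hs').1
            have hnotmem : a ∉ b :: u := by
              intro hm
              rcases List.mem_cons.mp hm with rfl | hu
              · exact hab rfl
              · exact absurd (hb_le a hu) (by omega)
            simp [pvAdjDup, hab, hrest, List.nodup_cons, hnotmem]

-- ===== VERDICT (by name: the statement is the Claim_ definition above) =====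
theorem check_phase_settings_spec : Claim_equal_check_phase_settings := by
  intro xs _
  unfold Spec_check_phase_settings check_phase_settings check_phase_settings_alt
  set s := PySem.List.sorted xs (fun x => x) false with hsdef
  have hperm : s.Perm xs := PySem.List.sorted_perm ..
  have hmem : ∀ y, y ∈ s ↔ y ∈ xs := fun y => hperm.mem_iff
  by_cases hlow : ∃ y ∈ xs, y < 5
  · have h1 : s.any (fun x => decide (x < 5)) = true := by
      rcases hlow with ⟨y, hy, hy5⟩
      refine List.any_eq_true.mpr ⟨y, (hmem y).mpr hy, ?_⟩
      simpa using hy5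
    have h2 : xs.all (fun x => decide (5 ≤ x)) = false := by
      rcases hlow with ⟨y, hy, hy5⟩
      refine List.all_eq_false.mpr ⟨y, hy, ?_⟩
      simp
      omega
    simp [h1, h2]
  · have h1 : s.any (fun x => decide (x < 5)) = false := by
      refine List.any_eq_false.mpr ?_
      intro y hy
      by_contra hc
      simp at hc
      exact hlow ⟨y, (hmem y).mp hy, by omega⟩
    have h2 : xs.all (fun x => decide (5 ≤ x)) = true := by
      refine List.all_eq_true.mpr ?_
      intro y hy
      by_contra hc
      simp at hc
      exact hlow ⟨y, hy, by omega⟩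
    have hpair : s.Pairwise (· ≤ ·) := by
      simpa using PySem.List.sorted_pairwise (xs := xs) (key := fun x => x)
    have hiff : pvAdjDup s = false ↔ xs.Nodup :=
      (pv_adjDup_iff s hpair).trans hperm.nodup_iff
    have hlen := pv_len_ofList_iff xs
    by_cases hnd : xs.Nodup
    · simp [h1, h2, hiff.mpr hnd, hlen.mpr hnd]
    · have hd : pvAdjDup s = true := by
        cases h : pvAdjDup s
        · exact absurd (hiff.mp h) hnd
        · rfl
      have hl : ((PySem.Set.ofList xs).length == xs.length) = false := by
        simp only [beq_eq_false_iff_ne, ne_eq]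
        exact fun h => hnd (hlen.mp h)
      simp [h1, h2, hd, hl]
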